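-- pv_equiv track=rewrite | github.com/Zammy/HandwriteOCR | src/line_extraction.py | compute_line_bounding_boxes
-- ===== SOURCE A (Python) =====
-- def compute_line_bounding_boxes(stats, labels, image_width):
--     line_boxes = {}
--
--     for label, stat in zip(labels, stats):
--         x, y, w, h, area = stat
--         y2 = y + h
--
--         if label not in line_boxes:
--             line_boxes[label] = [y, y2]
--         else:
--             bx = line_boxes[label]
--             bx[0] = min(bx[0], y)
--             bx[1] = max(bx[1], y2)
--
--     for label in line_boxes:
--         y1, y2 = line_boxes[label]
--         line_boxes[label] = (0, y1, image_width, y2)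
--
--     return line_boxes
-- ===== SOURCE B (Python) =====
-- def compute_line_bounding_boxes(stats, labels, image_width):
--     # Pass 1: group every (y, y2) pair per label, keeping first-appearance order.
--     groups = {}
--     for label, stat in zip(labels, stats):
--         x, y, w, h, area = stat
--         groups.setdefault(label, []).append((y, y + h))
--     # Pass 2: reduce each group to its vertical bounding box.
--     result = {}
--     for label, pairs in groups.items():
--         result[label] = (0, min(p[0] for p in pairs), image_width,
--                          max(p[1] for p in pairs))
--     return result
-- ===== Notes on version B (the rewrite author's own statement) =====
-- stated objective: alternative
-- what changed: A streams over the components updating a running min/max box per label in one dict; B first builds a dict-of-lists grouping every (y, y2) interval per label (first-appearance order) and then, in a separate reduction pass over the grouped table, computes (0, min y, image_width, max y2) for each label.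
import Mathlib
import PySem

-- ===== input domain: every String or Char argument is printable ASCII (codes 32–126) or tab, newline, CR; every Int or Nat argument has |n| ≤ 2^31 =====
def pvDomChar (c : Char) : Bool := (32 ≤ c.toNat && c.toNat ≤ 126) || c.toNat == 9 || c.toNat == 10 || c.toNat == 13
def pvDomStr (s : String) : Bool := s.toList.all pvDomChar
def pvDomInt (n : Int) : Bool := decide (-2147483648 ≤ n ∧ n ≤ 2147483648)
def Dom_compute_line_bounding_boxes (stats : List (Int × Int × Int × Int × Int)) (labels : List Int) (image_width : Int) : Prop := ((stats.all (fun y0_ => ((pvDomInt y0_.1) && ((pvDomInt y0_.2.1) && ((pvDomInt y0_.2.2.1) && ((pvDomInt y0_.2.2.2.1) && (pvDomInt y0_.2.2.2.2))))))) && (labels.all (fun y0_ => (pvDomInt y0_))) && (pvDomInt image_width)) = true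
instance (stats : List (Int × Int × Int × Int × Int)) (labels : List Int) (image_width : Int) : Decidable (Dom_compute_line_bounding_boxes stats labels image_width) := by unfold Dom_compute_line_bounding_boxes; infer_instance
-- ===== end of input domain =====

-- B replaces A's streaming per-label min/max update by a two-pass decomposition
-- (group all (y, y2) intervals per label, then reduce each group); same cost ("alternative").


-- ===== PORT A =====
-- value written to line_boxes[label] by one iteration of A's first loop
-- (lp = (label, (x, y, w, h, area)); both Python branches assign line_boxes[label])
def pvValA (d : PySem.Dict Int (Int × Int)) (lp : Int × (Int × Int × Int × Int × Int)) : Int × Int :=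
  let y := lp.2.2.1
  let h := lp.2.2.2.2.1
  let y2 := y + h
  match d.get? lp.1 with
  | none => (y, y2)
  | some bx => (min bx.1 y, max bx.2 y2)

def compute_line_bounding_boxes (stats : List (Int × Int × Int × Int × Int)) (labels : List Int) (image_width : Int) : List (Int × Int × Int × Int × Int) :=
  let line_boxes : PySem.Dict Int (Int × Int) :=
    (labels.zip stats).foldl (fun d lp => d.insert lp.1 (pvValA d lp)) PySem.Dict.empty
  -- second loop: rewrite each value [y1, y2] to (0, y1, image_width, y2), key order kept
  line_boxes.items.map (fun q => (q.1, 0, q.2.1, image_width, q.2.2))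

-- ===== PORT B =====
-- min(p[0] for p in pairs) / max(p[1] for p in pairs) over a nonempty group
-- (the [] branch is unreachable: every stored group gets at least one element)
def pvMinY (pairs : List (Int × Int)) : Int :=
  match pairs.map Prod.fst with
  | [] => 0
  | y :: ys => ys.foldl min y

def pvMaxY2 (pairs : List (Int × Int)) : Int :=
  match pairs.map Prod.snd with
  | [] => 0
  | y :: ys => ys.foldl max y

def compute_line_bounding_boxes_alt (stats : List (Int × Int × Int × Int × Int)) (labels : List Int) (image_width : Int) : List (Int × Int × Int × Int × Int) :=
  -- pass 1: group the (y, y2) intervals per label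
  let groups : PySem.Dict Int (List (Int × Int)) :=
    (labels.zip stats).foldl
      (fun d lp => d.modify lp.1 [] (fun g => g ++ [(lp.2.2.1, lp.2.2.1 + lp.2.2.2.2.1)]))
      PySem.Dict.empty
  -- pass 2: reduce each group
  groups.items.map (fun q => (q.1, 0, pvMinY q.2, image_width, pvMaxY2 q.2))

-- ===== PRECONDITION & SPEC =====
def Spec_compute_line_bounding_boxes (stats : List (Int × Int × Int × Int × Int)) (labels : List Int) (image_width : Int) (out : List (Int × Int × Int × Int × Int)) : Prop := out = compute_line_bounding_boxes_alt stats labels image_width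
instance (stats : List (Int × Int × Int × Int × Int)) (labels : List Int) (image_width : Int) (out : List (Int × Int × Int × Int × Int)) : Decidable (Spec_compute_line_bounding_boxes stats labels image_width out) := by unfold Spec_compute_line_bounding_boxes; infer_instance

-- ===== CLAIM (what is proved, stated in full; the proofs are below) =====
def Claim_equal_compute_line_bounding_boxes : Prop := ∀ (stats : List (Int × Int × Int × Int × Int)) (labels : List Int) (image_width : Int), Dom_compute_line_bounding_boxes stats labels image_width → Spec_compute_line_bounding_boxes stats labels image_width (compute_line_bounding_boxes stats labels image_width)

-- ===== LEMMAS AND PROOFS =====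

-- the (y, y2) interval of one zipped pair
def pvG (lp : Int × (Int × Int × Int × Int × Int)) : Int × Int :=
  (lp.2.2.1, lp.2.2.1 + lp.2.2.2.2.1)

-- the streaming combine step of A
def pvComb (a v : Int × Int) : Int × Int := (min a.1 v.1, max a.2 v.2)

-- one optional-state step of A's accumulator at a fixed key
def pvQ (o : Option (Int × Int)) (v : Int × Int) : Option (Int × Int) :=
  some (match o with | none => v | some a => pvComb a v)

lemma pvValA_eq (d : PySem.Dict Int (Int × Int)) (lp : Int × (Int × Int × Int × Int × Int)) :
    pvValA d lp = (pvQ (d.get? lp.1) (pvG lp)).getD (0, 0) := by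
  simp only [pvValA, pvQ, pvG]
  cases d.get? lp.1 <;> simp [pvComb]

lemma pvFoldQ (vs : List (Int × Int)) : ∀ a : Int × Int,
    vs.foldl pvQ (some a) = some (vs.foldl pvComb a) := by
  induction vs with
  | nil => intro a; rfl
  | cons v vs ih => intro a; simpa [pvQ] using ih (pvComb a v)

lemma pvA_get? (l : List (Int × (Int × Int × Int × Int × Int))) :
    ∀ (d : PySem.Dict Int (Int × Int)) (k : Int),
    (l.foldl (fun d lp => d.insert lp.1 (pvValA d lp)) d).get? k =
      ((l.filter (fun p => p.1 == k)).map pvG).foldl pvQ (d.get? k) := by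
  induction l with
  | nil => intro d k; rfl
  | cons p l ih =>
    intro d k
    simp only [List.foldl_cons, List.filter_cons]
    by_cases hk : p.1 = k
    · subst hk
      simp only [beq_self_eq_true, if_pos, List.map_cons, List.foldl_cons]
      rw [ih]
      congr 1
      rw [PySem.Dict.get?_insert]
      simp only [pvValA_eq, pvQ]
      cases d.get? p.1 <;> rfl
    · have hb : (p.1 == k) = false := by simpa using hk
      simp only [hb, if_neg, Bool.false_eq_true, not_false_iff]
      rw [ih]
      congr 1
      rw [PySem.Dict.get?_insert]
      simp [Ne.symm hk]

lemma pvB_getD (l : List (Int × (Int × Int × Int × Int × Int))) :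
    ∀ (d : PySem.Dict Int (List (Int × Int))) (k : Int),
    (l.foldl (fun d lp => d.modify lp.1 [] (fun g => g ++ [(lp.2.2.1, lp.2.2.1 + lp.2.2.2.2.1)])) d).getD k [] =
      d.getD k [] ++ (l.filter (fun p => p.1 == k)).map pvG := by
  induction l with
  | nil => intro d k; simp
  | cons p l ih =>
    intro d k
    simp only [List.foldl_cons, List.filter_cons]
    by_cases hk : p.1 = k
    · subst hk
      simp only [beq_self_eq_true, if_pos, List.map_cons]
      rw [ih, PySem.Dict.getD_modify]
      simp [pvG]
    · have hb : (p.1 == k) = false := by simpa using hk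
      simp only [hb, Bool.false_eq_true, if_neg, not_false_iff]
      rw [ih, PySem.Dict.getD_modify]
      simp [Ne.symm hk]

lemma pvFoldComb (vs : List (Int × Int)) : ∀ v : Int × Int,
    vs.foldl pvComb v = ((vs.map Prod.fst).foldl min v.1, (vs.map Prod.snd).foldl max v.2) := by
  induction vs with
  | nil => intro v; rfl
  | cons a vs ih => intro v; simpa [pvComb] using ih (pvComb v a)

-- ===== VERDICT (by name: the statement is the Claim_ definition above) =====
theorem compute_line_bounding_boxes_spec : Claim_equal_compute_line_bounding_boxes := by
  intro stats labels image_width _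
  show compute_line_bounding_boxes stats labels image_width
      = compute_line_bounding_boxes_alt stats labels image_width
  set l := labels.zip stats with hl
  show (l.foldl (fun d lp => d.insert lp.1 (pvValA d lp)) PySem.Dict.empty).items.map
        (fun q => (q.1, (0 : Int), q.2.1, image_width, q.2.2))
      = (l.foldl (fun d lp => d.modify lp.1 [] (fun g => g ++ [(lp.2.2.1, lp.2.2.1 + lp.2.2.2.2.1)])) PySem.Dict.empty).items.map
        (fun q => (q.1, (0 : Int), pvMinY q.2, image_width, pvMaxY2 q.2))
  set dA := l.foldl (fun d lp => d.insert lp.1 (pvValA d lp)) PySem.Dict.empty with hdA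
  set dB := l.foldl (fun d lp => d.modify lp.1 [] (fun g => g ++ [(lp.2.2.1, lp.2.2.1 + lp.2.2.2.2.1)])) PySem.Dict.empty with hdB
  have hkA : dA.keys = PySem.Set.update ([] : List Int) (l.map (fun lp => lp.1)) := by
    rw [hdA]
    have := PySem.Dict.keys_foldl_insert_key (κ := Int) (ν := Int × Int) l (fun lp => lp.1) pvValA PySem.Dict.empty
    simp only [PySem.Dict.keys_empty] at this
    exact this
  have hkB : dB.keys = PySem.Set.update ([] : List Int) (l.map (fun lp => lp.1)) := by
    rw [hdB]
    have := PySem.Dict.keys_foldl_modify_key (κ := Int) (ν := List (Int × Int)) l (fun lp => lp.1) []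
      (fun _ lp => fun g => g ++ [(lp.2.2.1, lp.2.2.1 + lp.2.2.2.2.1)]) PySem.Dict.empty
    simp only [PySem.Dict.keys_empty] at this
    exact this
  have hndA : dA.keys.Nodup := by
    rw [hdA]
    exact PySem.Dict.nodup_keys_foldl_insert_key l (fun lp => lp.1) pvValA PySem.Dict.empty
      (PySem.Dict.nodup_keys_empty (κ := Int) (ν := Int × Int))
  have hndB : dB.keys.Nodup := by
    rw [hdB]
    exact PySem.Dict.nodup_keys_foldl_modify_key l (fun lp => lp.1) []
      (fun _ lp => fun g => g ++ [(lp.2.2.1, lp.2.2.1 + lp.2.2.2.2.1)]) PySem.Dict.empty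
      (PySem.Dict.nodup_keys_empty (κ := Int) (ν := List (Int × Int)))
  rw [PySem.Dict.items_eq_map_keys dA hndA (0, 0), PySem.Dict.items_eq_map_keys dB hndB [],
      List.map_map, List.map_map, hkA, hkB]
  apply List.map_congr_left
  intro k hkmem
  have hmem : k ∈ l.map (fun lp => lp.1) := by
    have := (PySem.Set.mem_update (s := ([] : List Int)) (xs := l.map (fun lp => lp.1)) (y := k)).mp hkmem
    simpa using this
  -- the group of k is nonempty
  have hfil : (l.filter (fun p => p.1 == k)) ≠ [] := by
    obtain ⟨p, hp, hpk⟩ := List.mem_map.mp hmem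
    intro hnil
    have : p ∈ l.filter (fun p => p.1 == k) := List.mem_filter.mpr ⟨hp, by simp [hpk]⟩
    simp [hnil] at this
  obtain ⟨v, vs, hvvs⟩ := List.exists_cons_of_ne_nil (by
    intro h
    exact hfil (List.map_eq_nil_iff.mp h) : (l.filter (fun p => p.1 == k)).map pvG ≠ [])
  have hA : dA.getD k (0, 0) = vs.foldl pvComb v := by
    rw [PySem.Dict.getD_eq_get?_getD, hdA, pvA_get? l PySem.Dict.empty k]
    rw [show (PySem.Dict.empty : PySem.Dict Int (Int × Int)).get? k = none from PySem.Dict.get?_empty k]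
    rw [hvvs]
    simp only [List.foldl_cons, pvQ]
    rw [pvFoldQ]
    rfl
  have hB : dB.getD k [] = v :: vs := by
    rw [hdB, pvB_getD l PySem.Dict.empty k, hvvs]
    simp
  simp only [Function.comp]
  rw [hA, hB, pvFoldComb]
  simp [pvMinY, pvMaxY2]
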